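-- pv_equiv track=rewrite | github.com/maryala9/InterviewPractise | Day1/arithemetic_sequence.py | check_arithemetic_sequence
-- ===== SOURCE A (Python) =====
-- def check_arithemetic_sequence(nums, l, r):
--     answers = []
--     for (L,R) in zip(l, r):
--         subarray = nums[L:R+1]
--         subarray = sorted(subarray)
--         sequence_flag = True
--
--         for j in range( 1, len(subarray)):
--             if subarray[j] - subarray[j-1] != subarray[1] - subarray[0]:
--                 sequence_flag = False
--                 break
--         answers.append(sequence_flag)
--
--     return answers
-- ===== SOURCE B (Python) =====
-- def check_arithemetic_sequence(nums, l, r):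
--     answers = []
--     for (L, R) in zip(l, r):
--         sub = nums[L:R+1]
--         n = len(sub)
--         if n <= 2:
--             answers.append(True)
--             continue
--         lo, hi = min(sub), max(sub)
--         if (hi - lo) % (n - 1) != 0:
--             answers.append(False)
--             continue
--         d = (hi - lo) // (n - 1)
--         if d == 0:
--             answers.append(True)
--             continue
--         seen = set(sub)
--         answers.append(len(seen) == n and all(lo + i * d in seen for i in range(n)))
--     return answers
-- ===== Notes on version B (the rewrite author's own statement) =====
-- stated objective: faster
-- what changed: Per query, instead of sorting the subarray and scanning consecutive gaps, B computes min and max, derives the required common difference d = (max-min)/(k-1), and verifies membership of each expected term lo+i*d in a set of the subarray (with a duplicate-count check), eliminating the sort.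
import Mathlib
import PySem

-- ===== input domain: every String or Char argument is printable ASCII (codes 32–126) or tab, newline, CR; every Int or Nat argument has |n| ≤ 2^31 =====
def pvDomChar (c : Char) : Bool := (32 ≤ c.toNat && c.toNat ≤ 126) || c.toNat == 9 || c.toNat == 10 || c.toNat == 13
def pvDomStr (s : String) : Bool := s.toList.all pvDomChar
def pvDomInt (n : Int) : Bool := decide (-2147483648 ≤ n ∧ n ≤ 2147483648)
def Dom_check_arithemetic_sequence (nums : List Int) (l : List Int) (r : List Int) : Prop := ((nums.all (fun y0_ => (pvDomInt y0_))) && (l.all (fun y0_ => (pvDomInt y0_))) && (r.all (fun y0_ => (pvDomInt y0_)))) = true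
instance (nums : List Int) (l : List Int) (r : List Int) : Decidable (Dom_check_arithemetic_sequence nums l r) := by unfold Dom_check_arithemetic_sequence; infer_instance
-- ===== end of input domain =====

-- B replaces A's per-query sort-then-scan by a min/max + derived common difference + set membership check (no sorting).


-- ===== PORT A =====
def check_arithemetic_sequence (nums : List Int) (l : List Int) (r : List Int) : List Bool :=
  (l.zip r).foldl (fun answers LR =>
    let subarray := PySem.List.slice nums (some LR.1) (some (LR.2 + 1))
    let subarray := PySem.List.sorted subarray (fun x => x) false
    -- the inner for-loop sets sequence_flag := False and breaks on the first bad gap: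
    -- it is rendered as the conjunction over range(1, len(subarray))
    let sequence_flag := (PySem.List.pyRange 1 (subarray.length : Int) 1).all
      (fun j => decide (PySem.List.pyGetD subarray j 0 - PySem.List.pyGetD subarray (j - 1) 0
                      = PySem.List.pyGetD subarray 1 0 - PySem.List.pyGetD subarray 0 0))
    answers ++ [sequence_flag]) []

-- ===== PORT B =====
def check_arithemetic_sequence_alt (nums : List Int) (l : List Int) (r : List Int) : List Bool :=
  (l.zip r).foldl (fun answers LR =>
    let sub := PySem.List.slice nums (some LR.1) (some (LR.2 + 1))
    let n := sub.length
    let ans :=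
      if n ≤ 2 then true
      else
        let lo := (PySem.List.min? sub (fun x => x)).getD 0
        let hi := (PySem.List.max? sub (fun x => x)).getD 0
        if PySem.Int.mod (hi - lo) ((n : Int) - 1) ≠ 0 then false
        else
          let d := PySem.Int.floordiv (hi - lo) ((n : Int) - 1)
          if d = 0 then true
          else
            let seen := PySem.Set.ofList sub
            decide (PySem.Set.len seen = (n : Int)) &&
              (PySem.List.pyRange 0 (n : Int) 1).all (fun i => PySem.Set.contains seen (lo + i * d))
    answers ++ [ans]) []

-- ===== PRECONDITION & SPEC =====
def Spec_check_arithemetic_sequence (nums : List Int) (l : List Int) (r : List Int) (out : List Bool) : Prop := out = check_arithemetic_sequence_alt nums l r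
instance (nums : List Int) (l : List Int) (r : List Int) (out : List Bool) : Decidable (Spec_check_arithemetic_sequence nums l r out) := by unfold Spec_check_arithemetic_sequence; infer_instance

-- ===== CLAIM (what is proved, stated in full; the proofs are below) =====
def Claim_equal_check_arithemetic_sequence : Prop := ∀ (nums : List Int) (l : List Int) (r : List Int), Dom_check_arithemetic_sequence nums l r → Spec_check_arithemetic_sequence nums l r (check_arithemetic_sequence nums l r)

-- ===== LEMMAS AND PROOFS =====

-- A's per-query flag, on an arbitrary (already sliced) subarray
def aFlag (xs : List Int) : Bool :=
  let t := PySem.List.sorted xs (fun x => x) false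
  (PySem.List.pyRange 1 (t.length : Int) 1).all
      (fun j => decide (PySem.List.pyGetD t j 0 - PySem.List.pyGetD t (j - 1) 0
                      = PySem.List.pyGetD t 1 0 - PySem.List.pyGetD t 0 0))

-- B's per-query answer, on an arbitrary subarray
def bFlag (xs : List Int) : Bool :=
  let n := xs.length
  if n ≤ 2 then true
  else
    let lo := (PySem.List.min? xs (fun x => x)).getD 0
    let hi := (PySem.List.max? xs (fun x => x)).getD 0
    if PySem.Int.mod (hi - lo) ((n : Int) - 1) ≠ 0 then false
    else
      let d := PySem.Int.floordiv (hi - lo) ((n : Int) - 1)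
      if d = 0 then true
      else
        let seen := PySem.Set.ofList xs
        decide (PySem.Set.len seen = (n : Int)) &&
          (PySem.List.pyRange 0 (n : Int) 1).all (fun i => PySem.Set.contains seen (lo + i * d))

lemma aFlag_iff (xs : List Int) :
    aFlag xs = true ↔ ∀ j : Int, 1 ≤ j → j < ((PySem.List.sorted xs (fun x => x) false).length : Int) →
      PySem.List.pyGetD (PySem.List.sorted xs (fun x => x) false) j 0 - PySem.List.pyGetD (PySem.List.sorted xs (fun x => x) false) (j - 1) 0
        = PySem.List.pyGetD (PySem.List.sorted xs (fun x => x) false) 1 0 - PySem.List.pyGetD (PySem.List.sorted xs (fun x => x) false) 0 0 := by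
  simp [aFlag, List.all_eq_true, PySem.List.mem_pyRange_one]

lemma aFlag_iff_nat (xs : List Int) :
    aFlag xs = true ↔ ∀ i : Nat, i + 1 < (PySem.List.sorted xs (fun x => x) false).length →
      (PySem.List.sorted xs (fun x => x) false).getD (i+1) 0 - (PySem.List.sorted xs (fun x => x) false).getD i 0
        = (PySem.List.sorted xs (fun x => x) false).getD 1 0 - (PySem.List.sorted xs (fun x => x) false).getD 0 0 := by
  rw [aFlag_iff]
  have e : ∀ i : Nat, ((i+1:Nat):Int) - 1 = ((i:Nat):Int) := by intro i; push_cast; ring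
  constructor
  · intro h i hi
    have := h ((i+1 : Nat) : Int) (by exact_mod_cast Nat.le_add_left 1 i) (by exact_mod_cast hi)
    rw [e, PySem.List.pyGetD_natCast, PySem.List.pyGetD_natCast] at this
    simpa [PySem.List.pyGetD_ofNat'] using this
  · intro h j h1 h2
    obtain ⟨i, rfl⟩ : ∃ i : Nat, j = ((i+1:Nat):Int) := ⟨(j-1).toNat, by omega⟩
    have := h i (by exact_mod_cast h2)
    rw [e, PySem.List.pyGetD_natCast, PySem.List.pyGetD_natCast]
    simpa [PySem.List.pyGetD_ofNat'] using this

lemma gaps_closed (t : List Int) (d0 : Int)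
    (h : ∀ i : Nat, i + 1 < t.length → t.getD (i+1) 0 - t.getD i 0 = d0) :
    ∀ i : Nat, i < t.length → t.getD i 0 = t.getD 0 0 + i * d0 := by
  intro i
  induction i with
  | zero => simp
  | succ k ih =>
    intro hlt
    have h1 := h k hlt
    have h2 := ih (by omega)
    push_cast
    linarith

lemma pairwise_of_closed (t : List Int) (d0 : Int) (hd : 0 < d0)
    (h : ∀ i : Nat, i < t.length → t.getD i 0 = t.getD 0 0 + i * d0) :
    t.Pairwise (· < ·) := by
  rw [List.pairwise_iff_getElem]
  intro i j hi hj hij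
  have := h i (by omega); have := h j hj
  simp only [List.getD_eq_getElem?_getD, List.getElem?_eq_getElem, hi, hj] at *
  simp_all

lemma sorted_getD_mono (xs : List Int) (p q : Nat) (hpq : p ≤ q)
    (hq : q < (PySem.List.sorted xs (fun x => x) false).length) :
    (PySem.List.sorted xs (fun x => x) false).getD p 0 ≤ (PySem.List.sorted xs (fun x => x) false).getD q 0 := by
  rw [List.getD_eq_getElem _ _ (by omega), List.getD_eq_getElem _ _ hq]
  exact PySem.List.sorted_id_getElem_mono xs hpq hq

-- A implies B (large case)
lemma a_to_b (xs : List Int) (hn : 2 < xs.length) (hA : aFlag xs = true) : bFlag xs = true := by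
  have hperm : (PySem.List.sorted xs (fun x => x) false).Perm xs := PySem.List.sorted_perm xs (fun x => x) false
  set t := PySem.List.sorted xs (fun x => x) false with ht
  have hlen : t.length = xs.length := hperm.length_eq
  have hgaps := (aFlag_iff_nat xs).mp hA
  rw [← ht] at hgaps
  set d0 := t.getD 1 0 - t.getD 0 0 with hd0def
  have hcf : ∀ i : Nat, i < t.length → t.getD i 0 = t.getD 0 0 + i * d0 :=
    gaps_closed t d0 (fun i hi => hgaps i hi)
  have hmem_t : ∀ k, k < t.length → t.getD k 0 ∈ xs := by
    intro k hk
    rw [List.getD_eq_getElem t 0 hk]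
    exact hperm.subset (List.getElem_mem hk)
  have hd0nn : 0 ≤ d0 := by
    have := sorted_getD_mono xs 0 1 (by omega) (by rw [← ht]; omega)
    rw [← ht] at this
    omega
  -- min and max
  obtain ⟨m, hm⟩ : ∃ m, PySem.List.min? xs (fun x => x) = some m := by
    cases h : PySem.List.min? xs (fun x => x) with
    | none => rw [PySem.List.min?_eq_none_iff] at h; subst h; simp at hn
    | some m => exact ⟨m, rfl⟩
  obtain ⟨M, hM⟩ : ∃ M, PySem.List.max? xs (fun x => x) = some M := by
    cases h : PySem.List.max? xs (fun x => x) with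
    | none => rw [PySem.List.max?_eq_none_iff] at h; subst h; simp at hn
    | some M => exact ⟨M, rfl⟩
  have hminle : ∀ y ∈ xs, m ≤ y := PySem.List.min?_isMin hm
  have hmaxge : ∀ y ∈ xs, y ≤ M := PySem.List.max?_isMax hM
  have hlo : m = t.getD 0 0 := by
    refine le_antisymm (hminle _ (hmem_t 0 (by omega))) ?_
    obtain ⟨k, hk, hkm⟩ := List.mem_iff_getElem.mp (hperm.mem_iff.mpr (PySem.List.min?_mem hm))
    have := hcf k hk
    rw [List.getD_eq_getElem t 0 hk, hkm] at this
    nlinarith [Int.natCast_nonneg k]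
  have hhi : M = t.getD 0 0 + ((xs.length : Int) - 1) * d0 := by
    have hlast : t.getD (xs.length - 1) 0 = t.getD 0 0 + ((xs.length : Int) - 1) * d0 := by
      have := hcf (xs.length - 1) (by omega)
      rw [this]
      congr 1
      have : ((xs.length - 1 : Nat) : Int) = (xs.length : Int) - 1 := by omega
      rw [this]
    refine le_antisymm ?_ ?_
    · obtain ⟨k, hk, hkM⟩ := List.mem_iff_getElem.mp (hperm.mem_iff.mpr (PySem.List.max?_mem hM))
      have hck := hcf k hk
      rw [List.getD_eq_getElem t 0 hk, hkM] at hck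
      have hkle : (k : Int) ≤ (xs.length : Int) - 1 := by omega
      nlinarith
    · rw [← hlast]; exact hmaxge _ (hmem_t _ (by omega))
  -- unfold bFlag
  have hsub : M - m = ((xs.length:Int) - 1) * d0 := by rw [hlo, hhi]; ring
  simp only [bFlag]
  rw [if_neg (by omega)]
  rw [hm, hM]
  simp only [Option.getD_some]
  have hmod : PySem.Int.mod (M - m) ((xs.length : Int) - 1) = 0 := by
    rw [hsub, PySem.Int.mod_eq_zero_iff_dvd]
    exact dvd_mul_right _ _
  rw [if_neg (by simp [hmod])]
  have hdval : PySem.Int.floordiv (M - m) ((xs.length : Int) - 1) = d0 := by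
    rw [hsub, PySem.Int.floordiv_eq_ediv_of_pos (by omega)]
    exact Int.mul_ediv_cancel_left _ (by omega)
  rw [hdval]
  by_cases hz : d0 = 0
  · rw [if_pos hz]
  · rw [if_neg hz]
    have hd0pos : 0 < d0 := lt_of_le_of_ne hd0nn (Ne.symm hz)
    have hpw : t.Pairwise (· < ·) := pairwise_of_closed t d0 hd0pos hcf
    have hnd : xs.Nodup := (hperm.nodup_iff).mp (hpw.imp ne_of_lt)
    have hofl : PySem.Set.ofList xs = xs := PySem.Set.ofList_eq_self_of_nodup xs hnd
    simp only [hofl, PySem.Set.len, Bool.and_eq_true, decide_eq_true_eq]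
    refine ⟨trivial, ?_⟩
    rw [List.all_eq_true]
    intro i hi
    rw [PySem.List.mem_pyRange_one] at hi
    rw [PySem.Set.contains_iff]
    have hit : m + i * d0 = t.getD i.toNat 0 := by
      rw [hcf i.toNat (by omega), ← hlo]
      congr 1
      have : ((i.toNat : Nat) : Int) = i := by omega
      rw [this]
    rw [hit]
    exact hmem_t _ (by omega)

-- B implies A (large case)
lemma b_to_a (xs : List Int) (hn : 2 < xs.length) (hB : bFlag xs = true) : aFlag xs = true := by
  have hperm : (PySem.List.sorted xs (fun x => x) false).Perm xs := PySem.List.sorted_perm xs (fun x => x) false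
  have hlen : (PySem.List.sorted xs (fun x => x) false).length = xs.length := hperm.length_eq
  have hmem_t : ∀ k, k < (PySem.List.sorted xs (fun x => x) false).length →
      (PySem.List.sorted xs (fun x => x) false).getD k 0 ∈ xs := by
    intro k hk
    rw [List.getD_eq_getElem _ 0 hk]
    exact hperm.subset (List.getElem_mem hk)
  obtain ⟨m, hm⟩ : ∃ m, PySem.List.min? xs (fun x => x) = some m := by
    cases h : PySem.List.min? xs (fun x => x) with
    | none => rw [PySem.List.min?_eq_none_iff] at h; subst h; simp at hn
    | some m => exact ⟨m, rfl⟩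
  obtain ⟨M, hM⟩ : ∃ M, PySem.List.max? xs (fun x => x) = some M := by
    cases h : PySem.List.max? xs (fun x => x) with
    | none => rw [PySem.List.max?_eq_none_iff] at h; subst h; simp at hn
    | some M => exact ⟨M, rfl⟩
  have hminle : ∀ y ∈ xs, m ≤ y := PySem.List.min?_isMin hm
  have hmaxge : ∀ y ∈ xs, y ≤ M := PySem.List.max?_isMax hM
  simp only [bFlag] at hB
  rw [if_neg (by omega), hm, hM] at hB
  simp only [Option.getD_some] at hB
  by_cases hmod : PySem.Int.mod (M - m) ((xs.length : Int) - 1) = 0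
  · rw [if_neg (by simp [hmod])] at hB
    by_cases hz : PySem.Int.floordiv (M - m) ((xs.length : Int) - 1) = 0
    · -- all elements equal
      have hMm : M = m := by
        have h0 := PySem.Int.floordiv_mul_add_mod (M - m) ((xs.length : Int) - 1)
        rw [hz, hmod] at h0
        omega
      have hallm : ∀ y ∈ xs, y = m := fun y hy => le_antisymm (by have := hmaxge y hy; omega) (hminle y hy)
      rw [aFlag_iff_nat]
      intro i hi
      have e1 := hallm _ (hmem_t (i+1) hi)
      have e2 := hallm _ (hmem_t i (by omega))
      have e3 := hallm _ (hmem_t 1 (by omega))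
      have e4 := hallm _ (hmem_t 0 (by omega))
      rw [e1, e2, e3, e4]
    · rw [if_neg hz] at hB
      simp only [Bool.and_eq_true, decide_eq_true_eq] at hB
      obtain ⟨hlen', hall⟩ := hB
      rw [List.all_eq_true] at hall
      have hmM : m ≤ M := by
        obtain ⟨y, hy⟩ : ∃ y, y ∈ xs := by
          cases xs with
          | nil => simp at hn
          | cons a l => exact ⟨a, List.mem_cons_self⟩
        exact le_trans (hminle y hy) (hmaxge y hy)
      have hdpos : 0 < PySem.Int.floordiv (M - m) ((xs.length : Int) - 1) := by
        have : 0 ≤ PySem.Int.floordiv (M - m) ((xs.length : Int) - 1) := by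
          rw [PySem.Int.floordiv_eq_ediv_of_pos (by omega)]
          exact Int.ediv_nonneg (by omega) (by omega)
        omega
      set d := PySem.Int.floordiv (M - m) ((xs.length : Int) - 1) with hd
      have hslen : (PySem.Set.ofList xs).length = xs.length := by
        simp only [PySem.Set.len] at hlen'
        exact_mod_cast hlen'
      have hpseen : (PySem.Set.ofList xs).Perm xs :=
        (List.subperm_of_subset (PySem.Set.nodup_ofList xs)
          (fun x hx => (PySem.Set.mem_ofList xs x).mp hx)).perm_of_length_le (by omega)
      set AP := (PySem.List.pyRange 0 (xs.length : Int) 1).map (fun i => m + i * d) with hAP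
      have hAPpw : AP.Pairwise (· < ·) := by
        rw [hAP, List.pairwise_map]
        exact (PySem.List.pairwise_lt_pyRange_one 0 _).imp (fun h => by nlinarith)
      have hAPlen : AP.length = xs.length := by
        rw [hAP, List.length_map, PySem.List.length_pyRange_one]
        omega
      have hAPsub : AP ⊆ PySem.Set.ofList xs := by
        intro x hx
        rw [hAP, List.mem_map] at hx
        obtain ⟨i, hi, rfl⟩ := hx
        exact (PySem.Set.contains_iff _ _).mp (hall i hi)
      have hAPperm : AP.Perm xs :=
        ((List.subperm_of_subset (show AP.Nodup from hAPpw.imp (fun h => ne_of_lt h)) hAPsub).perm_of_length_le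
          (by omega)).trans hpseen
      have hts : PySem.List.sorted xs (fun x => x) false = AP :=
        PySem.List.sorted_eq_of_perm_of_pairwise_lt xs AP (fun x => x) hAPperm hAPpw
      have hAPget : ∀ k : Nat, k < xs.length → AP.getD k 0 = m + (k : Int) * d := by
        intro k hk
        rw [hAP, ← PySem.List.pyGetD_natCast]
        exact PySem.List.pyGetD_map_pyRange_of_nonneg _ _ _ _ (by positivity) (by exact_mod_cast hk)
      rw [aFlag_iff_nat]
      intro i hi
      rw [hts] at hi ⊢
      rw [hAPlen] at hi
      rw [hAPget (i+1) hi, hAPget i (by omega), hAPget 1 (by omega), hAPget 0 (by omega)]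
      push_cast
      ring
  · rw [if_pos hmod] at hB
    cases hB

lemma aFlag_small (xs : List Int) (h : xs.length ≤ 2) : aFlag xs = true := by
  rw [aFlag_iff]
  have hlen : (PySem.List.sorted xs (fun x => x) false).length = xs.length :=
    (PySem.List.sorted_perm xs (fun x => x) false).length_eq
  intro j h1 h2
  have : j = 1 := by omega
  subst this
  norm_num

theorem core (xs : List Int) : aFlag xs = bFlag xs := by
  by_cases hsmall : xs.length ≤ 2
  · rw [aFlag_small xs hsmall]
    simp [bFlag, hsmall]
  · cases ha : aFlag xs with
    | true => rw [a_to_b xs (by omega) ha]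
    | false =>
      cases hb : bFlag xs with
      | false => rfl
      | true => rw [b_to_a xs (by omega) hb] at ha; cases ha

-- ===== VERDICT (by name: the statement is the Claim_ definition above) =====
theorem check_arithemetic_sequence_spec : Claim_equal_check_arithemetic_sequence := by
  intro nums l r _hdom
  unfold Spec_check_arithemetic_sequence check_arithemetic_sequence check_arithemetic_sequence_alt
  rw [PySem.List.foldl_append_singleton_eq_map, PySem.List.foldl_append_singleton_eq_map]
  apply List.map_congr_left
  intro LR _
  exact core (PySem.List.slice nums (some LR.1) (some (LR.2 + 1)))
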